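-- pv_equiv track=rewrite | github.com/charles2648/AlgorithmsOnStrings | PA1/trie_matching_extended.py | solve
-- ===== SOURCE A (Python) =====
-- def solve(text, patterns):
--     t = Trie()
--     for p in patterns:
--         cn = t.root
--         for i in range(len(p)):
--             cs = p[i]
--             strings = [s.s for s in cn.outs]
--             if cs in strings:
--                 e = strings.index(cs)
--                 cn = cn.outs[e].tail
--             else:
--                 cn = t.addNode(cn, cs)
--         cn.end = True
--     return t.trieMatch(text)
--
-- class Trie:
--     def __init__(self):
--         self.root = self.Node(0)
--         self.count = 1
--         self.nodes = []
--         self.edges = []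
--
--     class Node:
--         def __init__(self, i):
--             self.ins = []
--             self.outs = []
--             self.index = i
--             self.end = False
--
--     class Edge:
--         def __init__(self, s, n, i):
--             self.s = s
--             self.head = n
--             self.tail = Trie.Node(i)
--             self.tail.ins.append(self)
--
--         def __str__(self):
--             return self.s
--
--         __repr__ = __str__
--
--     def addNode(self, n, s):
--         e = Trie.Edge(s, n, self.count)
--         self.edges.append(e)
--         self.count += 1
--         n.outs.append(e)
--         self.nodes.append(e.tail)
--         return e.tail
--
--     def prefixMatch(self, text):
--         v = self.root
--         i = 0
--         while True:
--             # check if we're done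
--             if v.end:
--                 return v.end
--             # if not, get next letter, see if it's an edge away
--             strings = [s.s for s in v.outs]
--             try:
--                 symbol = text[i]
--             except IndexError:
--                 return False
--             if symbol in strings and i < len(text):
--                 n = strings.index(symbol)
--                 v = v.outs[n].tail
--                 i += 1
--             else:
--                 return False
--
--     def trieMatch(self, text):
--         matches = []
--         for i in range(len(text)):
--             if self.prefixMatch(text[i:]):
--                 matches.append(i)
--         return matches
-- ===== SOURCE B (Python) =====
-- def solve(text, patterns):
--     return [i for i in range(len(text))
--             if any(text.startswith(p, i) for p in patterns)]
-- ===== Notes on version B (the rewrite author's own statement) =====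
-- stated objective: simpler
-- what changed: Replaced the hand-built trie (Node/Edge objects, per-position trie walk) by a direct two-line scan: for each start position, test whether any pattern is a prefix via str.startswith.
import Mathlib
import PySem

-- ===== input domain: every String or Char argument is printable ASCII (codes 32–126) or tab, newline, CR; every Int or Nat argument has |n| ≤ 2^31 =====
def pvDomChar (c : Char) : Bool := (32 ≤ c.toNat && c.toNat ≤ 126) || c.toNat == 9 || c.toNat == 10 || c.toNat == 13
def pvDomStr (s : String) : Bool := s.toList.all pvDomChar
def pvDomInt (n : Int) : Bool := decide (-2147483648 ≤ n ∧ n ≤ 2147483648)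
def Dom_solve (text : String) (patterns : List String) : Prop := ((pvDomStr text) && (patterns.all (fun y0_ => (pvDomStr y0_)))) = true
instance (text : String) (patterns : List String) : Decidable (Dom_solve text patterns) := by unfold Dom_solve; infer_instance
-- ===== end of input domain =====

-- B replaces A's hand-built trie and per-position trie walk by a direct scan
-- testing whether any pattern is a prefix at each start position (simpler).

-- ===== PORT A =====
-- A's Trie with Node/Edge objects is ported as an indexed structure: node i's
-- outgoing edges are `outs[i]` (char, child-index) in insertion order, its
-- `end` flag is `ends[i]`; node 0 is the root, `count` the next fresh index.

structure PTrie where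
  count : Nat
  outs : List (List (Char × Nat))
  ends : List Bool
deriving Repr, DecidableEq

-- `cs in strings` / `strings.index(cs)` followed by `outs[e]`: first edge whose char matches
def findEdge (es : List (Char × Nat)) (c : Char) : Option (Char × Nat) :=
  es.find? (fun e => e.1 == c)

-- the inner `for i in range(len(p))` loop of solve: walk/extend the trie, return new trie and final node
def insertLoop (t : PTrie) (v : Nat) : List Char → PTrie × Nat
  | [] => (t, v)
  | c :: rest =>
    match findEdge (t.outs.getD v []) c with
    | some e => insertLoop t e.2 rest
    | none =>
      -- t.addNode(cn, cs): new node with index count, edge appended to cn.outs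
      insertLoop ⟨t.count + 1,
                  (t.outs.set v ((t.outs.getD v []) ++ [(c, t.count)])) ++ [[]],
                  t.ends ++ [false]⟩ t.count rest

-- one iteration of `for p in patterns` body: insert p, then `cn.end = True`
def insertPat (t : PTrie) (p : String) : PTrie :=
  let r := insertLoop t 0 p.toList
  ⟨r.1.count, r.1.outs, r.1.ends.set r.2 true⟩

-- Trie.prefixMatch: while-loop as structural recursion on the remaining text
def pm (t : PTrie) (v : Nat) : List Char → Bool
  | [] => t.ends.getD v false          -- v.end then True; else text[i] raises IndexError → False
  | c :: rest =>
    if t.ends.getD v false then true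
    else
      match findEdge (t.outs.getD v []) c with
      | some e => pm t e.2 rest
      | none => false

def solve (text : String) (patterns : List String) : List Int :=
  let t := patterns.foldl insertPat ⟨1, [[]], [false]⟩   -- Trie(): root node 0, count 1
  -- trieMatch: for i in range(len(text)): if prefixMatch(text[i:]): matches.append(i)
  (List.range text.toList.length).foldl
    (fun acc i => if pm t 0 (text.toList.drop i) then acc ++ [(i : Int)] else acc) []

-- ===== PORT B =====
-- Source B: [i for i in range(len(text)) if any(text.startswith(p, i) for p in patterns)]
def solve_alt (text : String) (patterns : List String) : List Int :=
  (List.range text.toList.length).filterMap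
    (fun i => if patterns.any (fun p => p.toList.isPrefixOf (text.toList.drop i))
              then some (i : Int) else none)

-- ===== PRECONDITION & SPEC =====
def Spec_solve (text : String) (patterns : List String) (out : List Int) : Prop := out = solve_alt text patterns
instance (text : String) (patterns : List String) (out : List Int) : Decidable (Spec_solve text patterns out) := by unfold Spec_solve; infer_instance

-- ===== CLAIM (what is proved, stated in full; the proofs are below) =====
def Claim_equal_solve : Prop := ∀ (text : String) (patterns : List String), Dom_solve text patterns → Spec_solve text patterns (solve text patterns)

-- ===== LEMMAS AND PROOFS =====

-- abstract view of a trie: end flag, deterministic step, reachability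
def endAt (t : PTrie) (v : Nat) : Bool := t.ends.getD v false

def step (t : PTrie) (v : Nat) (c : Char) : Option Nat :=
  (findEdge (t.outs.getD v []) c).map (·.2)

def reach (t : PTrie) (v : Nat) : List Char → Option Nat
  | [] => some v
  | c :: l =>
    match step t v c with
    | some w => reach t w l
    | none => none

-- accepted from node v along exactly l
def acceptsB (t : PTrie) (v : Nat) (l : List Char) : Bool :=
  match reach t v l with
  | some w => endAt t w
  | none => false

def edgeP (t : PTrie) (v : Nat) (c : Char) (w : Nat) : Prop :=
  (c, w) ∈ t.outs.getD v []

-- well-formedness invariant of the tries A builds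
def WF (t : PTrie) : Prop :=
  t.outs.length = t.count ∧ t.ends.length = t.count ∧ 1 ≤ t.count ∧
  (∀ v c w, edgeP t v c w → v < t.count ∧ w < t.count ∧ v < w) ∧
  (∀ v₁ c₁ v₂ c₂ w, edgeP t v₁ c₁ w → edgeP t v₂ c₂ w → v₁ = v₂ ∧ c₁ = c₂) ∧
  (∀ v c w₁ w₂, edgeP t v c w₁ → edgeP t v c w₂ → w₁ = w₂)

-- extension: old edges and end flags survive, new material lives beyond t.count
def TExt (t t' : PTrie) : Prop :=
  t.count ≤ t'.count ∧
  (∀ v c w, step t v c = some w → step t' v c = some w) ∧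
  (∀ v c w, v < t.count → step t' v c = some w → step t v c = some w ∨ t.count ≤ w) ∧
  (∀ v, v < t.count → endAt t' v = endAt t v) ∧
  (∀ v, t.count ≤ v → endAt t' v = false)

theorem find?_char_some (es : List (Char × Nat)) (c : Char) (e : Char × Nat)
    (h : es.find? (fun e => e.1 == c) = some e) : e ∈ es ∧ e.1 = c := by
  refine ⟨List.mem_of_find?_eq_some h, ?_⟩
  have := List.find?_some h; simpa using this

theorem step_iff_edge (t : PTrie) (hWF : WF t) (v : Nat) (c : Char) (w : Nat) :
    step t v c = some w ↔ edgeP t v c w := by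
  unfold step findEdge edgeP
  constructor
  · intro h
    cases hf : (t.outs.getD v []).find? (fun e => e.1 == c) with
    | none => rw [hf] at h; simp at h
    | some e =>
      rw [hf] at h; simp at h
      obtain ⟨hm, hc⟩ := find?_char_some _ _ _ hf
      have : e = (c, w) := by cases e; simp_all
      rw [← this]; exact hm
  · intro h
    cases hf : (t.outs.getD v []).find? (fun e => e.1 == c) with
    | none =>
      exfalso
      have := List.find?_eq_none.mp hf (c, w) h
      simp at this
    | some e =>
      obtain ⟨hm, hc⟩ := find?_char_some _ _ _ hf
      have he : edgeP t v c e.2 := by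
        unfold edgeP
        have he2 : e = (c, e.2) := by cases e; simp_all
        rw [← he2]; exact hm
      have := hWF.2.2.2.2.2 v c e.2 w he h
      simp [this]

theorem step_none_iff (t : PTrie) (v : Nat) (c : Char) :
    step t v c = none ↔ ∀ w, ¬ edgeP t v c w := by
  unfold step findEdge edgeP
  constructor
  · intro h w hw
    cases hf : (t.outs.getD v []).find? (fun e => e.1 == c) with
    | none =>
      have := List.find?_eq_none.mp hf (c, w) hw
      simp at this
    | some e => rw [hf] at h; simp at h
  · intro h
    cases hf : (t.outs.getD v []).find? (fun e => e.1 == c) with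
    | none => rfl
    | some e =>
      exfalso
      obtain ⟨hm, hc⟩ := find?_char_some _ _ _ hf
      refine h e.2 ?_
      have he2 : e = (c, e.2) := by cases e; simp_all
      rw [← he2]; exact hm

theorem reach_le (t : PTrie) (hWF : WF t) :
    ∀ l v w, reach t v l = some w → v ≤ w := by
  intro l
  induction l with
  | nil => intro v w h; simp [reach] at h; omega
  | cons c rest ih =>
    intro v w h
    unfold reach at h
    cases hs : step t v c with
    | none => rw [hs] at h; exact absurd h (by simp)
    | some u =>
      rw [hs] at h
      have h1 := (step_iff_edge t hWF v c u).mp hs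
      have h2 := hWF.2.2.2.1 v c u h1
      have := ih u w h
      omega

theorem reach_append (t : PTrie) (v : Nat) (l : List Char) (c : Char) :
    reach t v (l ++ [c]) = (reach t v l).bind (fun w => step t w c) := by
  induction l generalizing v with
  | nil =>
    show reach t v [c] = (some v).bind fun w => step t w c
    unfold reach
    cases hs : step t v c with
    | none => simp [hs]
    | some u => simp [hs, reach]
  | cons d rest ih =>
    show (match step t v d with | some w => reach t w (rest ++ [c]) | none => none)
       = (match step t v d with | some w => reach t w rest | none => none).bind
           (fun w => step t w c)
    cases hs : step t v d with
    | none => rfl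
    | some u => simpa using ih u

theorem reach_lt (t : PTrie) (hWF : WF t) :
    ∀ l v w, v < t.count → reach t v l = some w → w < t.count := by
  intro l
  induction l with
  | nil => intro v w hv h; simp [reach] at h; omega
  | cons c rest ih =>
    intro v w hv h
    unfold reach at h
    cases hs : step t v c with
    | none => rw [hs] at h; exact absurd h (by simp)
    | some u =>
      rw [hs] at h
      have h2 := hWF.2.2.2.1 v c u ((step_iff_edge t hWF v c u).mp hs)
      exact ih u w h2.2.1 h

theorem reach_inj (t : PTrie) (hWF : WF t) :
    ∀ l₁ l₂ w, reach t 0 l₁ = some w → reach t 0 l₂ = some w → l₁ = l₂ := by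
  intro l₁
  induction l₁ using List.reverseRecOn with
  | nil =>
    intro l₂ w h1 h2
    simp [reach] at h1
    subst h1
    rcases List.eq_nil_or_concat l₂ with h | ⟨l₂', c₂, rfl⟩
    all_goals try rw [List.concat_eq_append] at h2
    · exact h.symm
    · exfalso
      rw [reach_append] at h2
      cases hr : reach t 0 l₂' with
      | none => rw [hr] at h2; exact absurd h2 (by simp)
      | some u =>
        rw [hr] at h2
        simp at h2
        have := hWF.2.2.2.1 u c₂ 0 ((step_iff_edge t hWF u c₂ 0).mp h2)
        omega
  | append_singleton l₁' c₁ ih =>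
    intro l₂ w h1 h2
    rw [reach_append] at h1
    cases hr1 : reach t 0 l₁' with
    | none => rw [hr1] at h1; exact absurd h1 (by simp)
    | some u₁ =>
      rw [hr1] at h1
      simp at h1
      rcases List.eq_nil_or_concat l₂ with rfl | ⟨l₂', c₂, rfl⟩
      all_goals try rw [List.concat_eq_append] at h2 ⊢
      · exfalso
        simp [reach] at h2
        subst h2
        have := hWF.2.2.2.1 u₁ c₁ 0 ((step_iff_edge t hWF u₁ c₁ 0).mp h1)
        omega
      · rw [reach_append] at h2
        cases hr2 : reach t 0 l₂' with
        | none => rw [hr2] at h2; exact absurd h2 (by simp)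
        | some u₂ =>
          rw [hr2] at h2
          simp at h2
          have e1 := (step_iff_edge t hWF u₁ c₁ w).mp h1
          have e2 := (step_iff_edge t hWF u₂ c₂ w).mp h2
          obtain ⟨hu, hc⟩ := hWF.2.2.2.2.1 u₁ c₁ u₂ c₂ w e1 e2
          subst hu; subst hc
          rw [ih l₂' u₁ hr1 hr2]

theorem acceptsB_nil (t : PTrie) (v : Nat) : acceptsB t v [] = endAt t v := rfl

theorem acceptsB_cons (t : PTrie) (v : Nat) (c : Char) (l : List Char) :
    acceptsB t v (c :: l) = match step t v c with
      | some w => acceptsB t w l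
      | none => false := by
  cases hs : step t v c with
  | none => simp [acceptsB, reach, hs]
  | some u => simp [acceptsB, reach, hs]

def addN (t : PTrie) (v : Nat) (c : Char) : PTrie :=
  ⟨t.count + 1, (t.outs.set v ((t.outs.getD v []) ++ [(c, t.count)])) ++ [[]], t.ends ++ [false]⟩

theorem insertLoop_none_eq (t : PTrie) (v : Nat) (c : Char) (rest : List Char)
    (hf : findEdge (t.outs.getD v []) c = none) :
    insertLoop t v (c :: rest) = insertLoop (addN t v c) t.count rest := by
  have h : insertLoop t v (c :: rest)
      = match findEdge (t.outs.getD v []) c with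
        | some e => insertLoop t e.2 rest
        | none => insertLoop (addN t v c) t.count rest := rfl
  rw [h, hf]

theorem insertLoop_some_eq (t : PTrie) (v : Nat) (c : Char) (rest : List Char) (e : Char × Nat)
    (hf : findEdge (t.outs.getD v []) c = some e) :
    insertLoop t v (c :: rest) = insertLoop t e.2 rest := by
  have h : insertLoop t v (c :: rest)
      = match findEdge (t.outs.getD v []) c with
        | some e' => insertLoop t e'.2 rest
        | none => insertLoop (addN t v c) t.count rest := rfl
  rw [h, hf]

theorem outs_getD_addN (t : PTrie) (v : Nat) (c : Char) (hv : v < t.outs.length) (x : Nat) :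
    (addN t v c).outs.getD x [] =
      if x = v then t.outs.getD v [] ++ [(c, t.count)] else t.outs.getD x [] := by
  unfold addN
  generalize t.outs.getD v [] ++ [(c, t.count)] = A
  have hlen : (t.outs.set v A).length = t.outs.length := by simp
  by_cases hx : x = v
  · subst hx
    rw [if_pos rfl, List.getD_eq_getElem?_getD, List.getElem?_append,
        if_pos (by rw [hlen]; exact hv), List.getElem?_set, if_pos rfl, if_pos hv]
    rfl
  · rw [if_neg hx, List.getD_eq_getElem?_getD, List.getD_eq_getElem?_getD, List.getElem?_append]
    by_cases hxl : x < t.outs.length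
    · rw [if_pos (by rw [hlen]; exact hxl), List.getElem?_set, if_neg (fun h => hx h.symm)]
    · rw [if_neg (by rw [hlen]; exact hxl), hlen,
          List.getElem?_eq_none (by omega : t.outs.length ≤ x)]
      by_cases h0 : x - t.outs.length = 0
      · rw [h0]; rfl
      · rw [List.getElem?_eq_none (by simp; omega)]

theorem ends_getD_addN (t : PTrie) (hlen : t.ends.length = t.count) (v : Nat) (c : Char) (x : Nat) :
    (addN t v c).ends.getD x false = if x < t.count then t.ends.getD x false else false := by
  unfold addN
  rw [List.getD_eq_getElem?_getD, List.getElem?_append, hlen]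
  by_cases hx : x < t.count
  · rw [if_pos hx, if_pos hx, List.getD_eq_getElem?_getD]
  · rw [if_neg hx, if_neg hx]
    by_cases h0 : x - t.count = 0
    · rw [h0]; rfl
    · rw [List.getElem?_eq_none (by simp; omega)]
      rfl

theorem edge_addN (t : PTrie) (v : Nat) (c : Char) (hv : v < t.outs.length)
    (x : Nat) (c' : Char) (w : Nat) :
    edgeP (addN t v c) x c' w ↔ edgeP t x c' w ∨ (x = v ∧ c' = c ∧ w = t.count) := by
  unfold edgeP
  rw [outs_getD_addN t v c hv x]
  by_cases hx : x = v
  · subst hx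
    rw [if_pos rfl, List.mem_append]
    simp
  · rw [if_neg hx]
    simp [hx]

theorem step_addN (t : PTrie) (v : Nat) (c : Char) (hv : v < t.outs.length)
    (hs : step t v c = none) (x : Nat) (c' : Char) :
    step (addN t v c) x c' =
      if x = v ∧ c' = c then some t.count else step t x c' := by
  unfold step findEdge
  rw [outs_getD_addN t v c hv x]
  by_cases hx : x = v
  · subst hx
    rw [if_pos rfl]
    unfold step findEdge at hs
    cases hfe : (t.outs.getD x []).find? (fun e => e.1 == c') with
    | some e =>
      obtain ⟨hm, hc⟩ := find?_char_some _ _ _ hfe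
      have hcc : ¬ c' = c := by
        intro h; subst h
        rw [hfe] at hs; simp at hs
      rw [if_neg (by tauto), List.find?_append, hfe]
      rfl
    | none =>
      rw [List.find?_append, hfe, Option.none_or]
      by_cases hcc : c' = c
      · subst hcc
        rw [if_pos ⟨rfl, rfl⟩]
        simp
      · rw [if_neg (by tauto)]
        have hbe : (c == c') = false := beq_eq_false_iff_ne.mpr (Ne.symm hcc)
        simp [List.find?, hbe]
  · rw [if_neg hx, if_neg (fun h => hx h.1)]

theorem WF_addN (t : PTrie) (v : Nat) (c : Char) (hWF : WF t) (hv : v < t.count)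
    (hs : step t v c = none) : WF (addN t v c) := by
  obtain ⟨ho, he, hc1, hb, hin, hfun⟩ := hWF
  have hv' : v < t.outs.length := by omega
  have hcount : (addN t v c).count = t.count + 1 := rfl
  refine ⟨?_, ?_, ?_, ?_, ?_, ?_⟩
  · show ((t.outs.set v _) ++ [[]]).length = t.count + 1
    simp [ho]
  · show (t.ends ++ [false]).length = t.count + 1
    simp [he]
  · omega
  · intro x c' w hxe
    rw [edge_addN t v c hv'] at hxe
    rcases hxe with h | ⟨rfl, rfl, rfl⟩
    · have := hb x c' w h; omega
    · omega
  · intro v₁ c₁ v₂ c₂ w h1 h2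
    rw [edge_addN t v c hv'] at h1 h2
    rcases h1 with h1 | ⟨rfl, rfl, rfl⟩
    · rcases h2 with h2 | ⟨rfl, rfl, rfl⟩
      · exact hin v₁ c₁ v₂ c₂ w h1 h2
      · exfalso; have := hb v₁ c₁ t.count h1; omega
    · rcases h2 with h2 | ⟨rfl, rfl, _⟩
      · exfalso; have := hb v₂ c₂ t.count h2; omega
      · exact ⟨rfl, rfl⟩
  · intro x c' w₁ w₂ h1 h2
    rw [edge_addN t v c hv'] at h1 h2
    have hnone := (step_none_iff t v c).mp hs
    rcases h1 with h1 | ⟨rfl, rfl, rfl⟩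
    · rcases h2 with h2 | ⟨rfl, rfl, rfl⟩
      · exact hfun x c' w₁ w₂ h1 h2
      · exact absurd h1 (hnone w₁)
    · rcases h2 with h2 | ⟨_, _, rfl⟩
      · exact absurd h2 (hnone w₂)
      · rfl

theorem TExt_addN (t : PTrie) (v : Nat) (c : Char) (hWF : WF t) (hv : v < t.count)
    (hs : step t v c = none) : TExt t (addN t v c) := by
  obtain ⟨ho, he, hc1, hb, hin, hfun⟩ := hWF
  have hv' : v < t.outs.length := by omega
  refine ⟨by show t.count ≤ t.count + 1; omega, ?_, ?_, ?_, ?_⟩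
  · intro x c' w h
    rw [step_addN t v c hv' hs x c']
    by_cases hxc : x = v ∧ c' = c
    · exfalso; obtain ⟨rfl, rfl⟩ := hxc; rw [hs] at h; exact absurd h (by simp)
    · rw [if_neg hxc]; exact h
  · intro x c' w hx h
    rw [step_addN t v c hv' hs x c'] at h
    by_cases hxc : x = v ∧ c' = c
    · rw [if_pos hxc] at h
      right
      simp at h
      omega
    · rw [if_neg hxc] at h; exact Or.inl h
  · intro x hx
    show (addN t v c).ends.getD x false = endAt t x
    rw [ends_getD_addN t he v c x, if_pos hx]
    rfl
  · intro x hx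
    show (addN t v c).ends.getD x false = false
    rw [ends_getD_addN t he v c x, if_neg (by omega)]

theorem TExt_refl (t : PTrie) (hWF : WF t) : TExt t t :=
  ⟨le_refl _, fun _ _ _ h => h, fun _ _ _ _ h => Or.inl h, fun _ _ => rfl, by
    intro v hv
    unfold endAt
    rw [List.getD_eq_getElem?_getD, List.getElem?_eq_none (by have := hWF.2.1; omega)]
    rfl⟩

theorem TExt_trans (t₁ t₂ t₃ : PTrie) (h12 : TExt t₁ t₂) (h23 : TExt t₂ t₃) : TExt t₁ t₃ := by
  obtain ⟨hc12, hs12, hr12, he12, hn12⟩ := h12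
  obtain ⟨hc23, hs23, hr23, he23, hn23⟩ := h23
  refine ⟨le_trans hc12 hc23, ?_, ?_, ?_, ?_⟩
  · intro v c w h; exact hs23 v c w (hs12 v c w h)
  · intro v c w hv h
    rcases hr23 v c w (by omega) h with h' | h'
    · rcases hr12 v c w hv h' with h'' | h''
      · exact Or.inl h''
      · exact Or.inr h''
    · exact Or.inr (by omega)
  · intro v hv; rw [he23 v (by omega), he12 v hv]
  · intro v hv
    by_cases h2 : v < t₂.count
    · rw [he23 v h2]; exact hn12 v hv
    · exact hn23 v (by omega)

theorem insertLoop_spec : ∀ (l : List Char) (t : PTrie) (v : Nat), WF t → v < t.count →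
    WF (insertLoop t v l).1 ∧ TExt t (insertLoop t v l).1 ∧
    (insertLoop t v l).2 < (insertLoop t v l).1.count ∧
    reach (insertLoop t v l).1 v l = some (insertLoop t v l).2 := by
  intro l
  induction l with
  | nil =>
    intro t v hWF hv
    exact ⟨hWF, TExt_refl t hWF, hv, rfl⟩
  | cons c rest ih =>
    intro t v hWF hv
    cases hf : findEdge (t.outs.getD v []) c with
    | some e =>
      rw [insertLoop_some_eq t v c rest e hf]
      have hs : step t v c = some e.2 := by unfold step; rw [hf]; rfl
      have hb := hWF.2.2.2.1 v c e.2 ((step_iff_edge t hWF v c e.2).mp hs)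
      obtain ⟨hWF', hE, hv', hr⟩ := ih t e.2 hWF hb.2.1
      refine ⟨hWF', hE, hv', ?_⟩
      unfold reach
      rw [hE.2.1 v c e.2 hs]
      exact hr
    | none =>
      rw [insertLoop_none_eq t v c rest hf]
      have hs : step t v c = none := by unfold step; rw [hf]; rfl
      have hWF1 := WF_addN t v c hWF hv hs
      have hE1 := TExt_addN t v c hWF hv hs
      have hvc : t.count < (addN t v c).count := by show t.count < t.count + 1; omega
      obtain ⟨hWF', hE', hv', hr⟩ := ih (addN t v c) t.count hWF1 hvc
      refine ⟨hWF', TExt_trans _ _ _ hE1 hE', hv', ?_⟩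
      unfold reach
      have hstep1 : step (addN t v c) v c = some t.count := by
        have hv2 : v < t.outs.length := by have := hWF.1; omega
        rw [step_addN t v c hv2 hs v c, if_pos ⟨rfl, rfl⟩]
      rw [hE'.2.1 v c t.count hstep1]
      exact hr


theorem reach_new (t t' : PTrie) (hE : TExt t t') :
    ∀ (l : List Char) (v w : Nat), reach t v l = some w → reach t' v l = some w := by
  intro l
  induction l with
  | nil => intro v w h; simpa [reach] using h
  | cons c rest ih =>
    intro v w h
    unfold reach at h ⊢
    cases hs : step t v c with
    | none => rw [hs] at h; exact absurd h (by simp)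
    | some u =>
      rw [hs] at h
      rw [hE.2.1 v c u hs]
      exact ih u w h

theorem reach_old (t t' : PTrie) (hWF : WF t) (hWF' : WF t') (hE : TExt t t') :
    ∀ (l : List Char) (v w : Nat), v < t.count → w < t.count →
      reach t' v l = some w → reach t v l = some w := by
  intro l
  induction l with
  | nil => intro v w _ _ h; simpa [reach] using h
  | cons c rest ih =>
    intro v w hv hw h
    unfold reach at h ⊢
    cases hs : step t' v c with
    | none => rw [hs] at h; exact absurd h (by simp)
    | some u =>
      rw [hs] at h
      rcases hE.2.2.1 v c u hv hs with h' | h'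
      · have hu : u < t.count := (hWF.2.2.2.1 v c u ((step_iff_edge t hWF v c u).mp h')).2.1
        rw [h']
        exact ih u w hu hw h
      · exfalso
        have := reach_le t' hWF' rest u w h
        omega

-- extensions do not change the language accepted from old nodes
theorem acceptsB_ext (t t' : PTrie) (hWF : WF t) (hWF' : WF t') (hE : TExt t t') :
    ∀ l, acceptsB t' 0 l = acceptsB t 0 l := by
  intro l
  have hc1 : 1 ≤ t.count := hWF.2.2.1
  have hiff : acceptsB t' 0 l = true ↔ acceptsB t 0 l = true := by
    unfold acceptsB
    constructor
    · intro h
      cases hr : reach t' 0 l with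
      | none => rw [hr] at h; exact absurd h (by simp)
      | some w =>
        rw [hr] at h
        have h' : endAt t' w = true := h
        have hw : w < t.count := by
          by_contra hge
          rw [hE.2.2.2.2 w (by omega)] at h'
          exact absurd h' (by simp)
        rw [reach_old t t' hWF hWF' hE l 0 w (by omega) hw hr]
        exact show endAt t w = true by rw [← hE.2.2.2.1 w hw]; exact h'
    · intro h
      cases hr : reach t 0 l with
      | none => rw [hr] at h; exact absurd h (by simp)
      | some w =>
        rw [hr] at h
        have h' : endAt t w = true := h
        have hw : w < t.count := reach_lt t hWF l 0 w (by omega) hr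
        rw [reach_new t t' hE l 0 w hr]
        exact show endAt t' w = true by rw [hE.2.2.2.1 w hw]; exact h'
  cases h1 : acceptsB t' 0 l <;> cases h2 : acceptsB t 0 l <;> simp_all

theorem reach_congr (t₁ t₂ : PTrie) (hst : ∀ x c, step t₁ x c = step t₂ x c) :
    ∀ (l : List Char) (v : Nat), reach t₁ v l = reach t₂ v l := by
  intro l
  induction l with
  | nil => intro v; rfl
  | cons c rest ih =>
    intro v
    unfold reach
    rw [hst v c]
    cases step t₂ v c with
    | none => rfl
    | some u => exact ih u

theorem insertPat_spec (t : PTrie) (p : String) (hWF : WF t) :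
    WF (insertPat t p) ∧
    (∀ l, acceptsB (insertPat t p) 0 l = true ↔ (acceptsB t 0 l = true ∨ l = p.toList)) := by
  have hc1 : 1 ≤ t.count := hWF.2.2.1
  obtain ⟨hWF', hE, hv', hr⟩ := insertLoop_spec p.toList t 0 hWF (by omega)
  obtain ⟨ho', he', hc1', hb', hin', hfun'⟩ := hWF'
  have houts : (insertPat t p).outs = (insertLoop t 0 p.toList).1.outs := rfl
  have hcount : (insertPat t p).count = (insertLoop t 0 p.toList).1.count := rfl
  have hstep : ∀ x c, step (insertPat t p) x c = step (insertLoop t 0 p.toList).1 x c :=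
    fun _ _ => rfl
  have hedge : ∀ x c w, edgeP (insertPat t p) x c w ↔ edgeP (insertLoop t 0 p.toList).1 x c w :=
    fun _ _ _ => Iff.rfl
  have hend : ∀ x, endAt (insertPat t p) x =
      if x = (insertLoop t 0 p.toList).2 then true else endAt (insertLoop t 0 p.toList).1 x := by
    intro x
    show ((insertLoop t 0 p.toList).1.ends.set (insertLoop t 0 p.toList).2 true).getD x false = _
    rw [List.getD_eq_getElem?_getD, List.getElem?_set]
    by_cases hx : x = (insertLoop t 0 p.toList).2
    · rw [if_pos hx, if_pos hx.symm, if_pos (by rw [he']; omega)]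
      rfl
    · rw [if_neg hx, if_neg (fun h => hx h.symm)]
      rfl
  have hWF'' : WF (insertPat t p) := by
    refine ⟨?_, ?_, ?_, ?_, ?_, ?_⟩
    · rw [houts, hcount]; exact ho'
    · show ((insertLoop t 0 p.toList).1.ends.set _ true).length = _
      rw [List.length_set, hcount]; exact he'
    · rw [hcount]; exact hc1'
    · intro v c w h; rw [hcount]; exact hb' v c w ((hedge v c w).mp h)
    · intro v₁ c₁ v₂ c₂ w h1 h2
      exact hin' v₁ c₁ v₂ c₂ w ((hedge _ _ _).mp h1) ((hedge _ _ _).mp h2)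
    · intro v c w₁ w₂ h1 h2
      exact hfun' v c w₁ w₂ ((hedge _ _ _).mp h1) ((hedge _ _ _).mp h2)
  have hreach : ∀ l v, reach (insertPat t p) v l = reach (insertLoop t 0 p.toList).1 v l :=
    fun l v => reach_congr _ _ hstep l v
  refine ⟨hWF'', ?_⟩
  intro l
  have hext := acceptsB_ext t (insertLoop t 0 p.toList).1 hWF ⟨ho', he', hc1', hb', hin', hfun'⟩ hE l
  rw [← hext]
  unfold acceptsB
  rw [hreach l 0]
  constructor
  · intro h
    cases hr2 : reach (insertLoop t 0 p.toList).1 0 l with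
    | none => rw [hr2] at h; exact absurd h (by simp)
    | some w =>
      rw [hr2] at h
      have h' : endAt (insertPat t p) w = true := h
      rw [hend w] at h'
      by_cases hw : w = (insertLoop t 0 p.toList).2
      · subst hw
        right
        exact reach_inj _ ⟨ho', he', hc1', hb', hin', hfun'⟩ l p.toList _ hr2 hr
      · rw [if_neg hw] at h'
        exact Or.inl h'
  · intro h
    rcases h with h | rfl
    · cases hr2 : reach (insertLoop t 0 p.toList).1 0 l with
      | none => rw [hr2] at h; exact absurd h (by simp)
      | some w =>
        rw [hr2] at h
        have h' : endAt (insertLoop t 0 p.toList).1 w = true := h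
        exact show endAt (insertPat t p) w = true by
          rw [hend w]
          by_cases hw : w = (insertLoop t 0 p.toList).2
          · rw [if_pos hw]
          · rw [if_neg hw]; exact h'
    · rw [hr]
      exact show endAt (insertPat t p) (insertLoop t 0 p.toList).2 = true by
        rw [hend _, if_pos rfl]

theorem pm_iff (t : PTrie) : ∀ (cs : List Char) (v : Nat),
    pm t v cs = true ↔ ∃ l, l <+: cs ∧ acceptsB t v l = true := by
  intro cs
  induction cs with
  | nil =>
    intro v
    constructor
    · intro h; exact ⟨[], List.prefix_refl _, by rw [acceptsB_nil]; exact h⟩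
    · rintro ⟨l, hp, ha⟩
      rw [List.prefix_nil] at hp; subst hp
      rw [acceptsB_nil] at ha; exact ha
  | cons c rest ih =>
    intro v
    unfold pm
    by_cases he : t.ends.getD v false = true
    · rw [if_pos he]
      constructor
      · intro _
        exact ⟨[], List.nil_prefix, by rw [acceptsB_nil]; simpa [endAt] using he⟩
      · intro _; rfl
    · rw [Bool.not_eq_true] at he
      rw [he]
      simp only [Bool.false_eq_true, if_false]
      cases hf : findEdge (t.outs.getD v []) c with
      | some e =>
        have hs : step t v c = some e.2 := by unfold step; rw [hf]; rfl
        constructor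
        · intro h
          obtain ⟨l, hp, ha⟩ := (ih e.2).mp h
          refine ⟨c :: l, List.cons_prefix_cons.mpr ⟨rfl, hp⟩, ?_⟩
          rw [acceptsB_cons, hs]; exact ha
        · rintro ⟨l, hp, ha⟩
          cases l with
          | nil =>
            rw [acceptsB_nil] at ha
            unfold endAt at ha
            rw [he] at ha
            exact absurd ha (by simp)
          | cons c' l' =>
            obtain ⟨hc, hp'⟩ := List.cons_prefix_cons.mp hp
            subst hc
            rw [acceptsB_cons, hs] at ha
            exact (ih e.2).mpr ⟨l', hp', ha⟩
      | none =>
        have hs : step t v c = none := by unfold step; rw [hf]; rfl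
        constructor
        · intro h; exact absurd h (by simp)
        · rintro ⟨l, hp, ha⟩
          cases l with
          | nil =>
            rw [acceptsB_nil] at ha
            unfold endAt at ha
            rw [he] at ha
            exact absurd ha (by simp)
          | cons c' l' =>
            obtain ⟨hc, hp'⟩ := List.cons_prefix_cons.mp hp
            subst hc
            rw [acceptsB_cons, hs] at ha
            exact absurd ha (by simp)

theorem WF_init : WF ⟨1, [[]], [false]⟩ := by
  refine ⟨rfl, rfl, le_refl 1, ?_, ?_, ?_⟩
  · intro v c w h
    unfold edgeP at h
    rcases v with _ | v <;> simp [List.getD] at h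
  · intro v₁ c₁ v₂ c₂ w h1 h2
    unfold edgeP at h1
    rcases v₁ with _ | v₁ <;> simp [List.getD] at h1
  · intro v c w₁ w₂ h1 h2
    unfold edgeP at h1
    rcases v with _ | v <;> simp [List.getD] at h1

theorem accepts_init (l : List Char) : acceptsB ⟨1, [[]], [false]⟩ 0 l = false := by
  cases l <;> rfl

theorem build_inv : ∀ (ps : List String) (t : PTrie), WF t →
    WF (ps.foldl insertPat t) ∧
    (∀ l, acceptsB (ps.foldl insertPat t) 0 l = true ↔
      (acceptsB t 0 l = true ∨ ∃ p ∈ ps, p.toList = l)) := by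
  intro ps
  induction ps with
  | nil => intro t hWF; exact ⟨hWF, by simp⟩
  | cons p ps ih =>
    intro t hWF
    have hP := insertPat_spec t p hWF
    obtain ⟨hW, hL⟩ := ih (insertPat t p) hP.1
    refine ⟨hW, ?_⟩
    intro l
    rw [List.foldl_cons] at *
    rw [hL l, hP.2 l]
    simp only [List.mem_cons]
    constructor
    · rintro ((h | h) | ⟨q, hq, hql⟩)
      · exact Or.inl h
      · exact Or.inr ⟨p, Or.inl rfl, h.symm⟩
      · exact Or.inr ⟨q, Or.inr hq, hql⟩
    · rintro (h | ⟨q, hq | hq, hql⟩)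
      · exact Or.inl (Or.inl h)
      · subst hq; exact Or.inl (Or.inr hql.symm)
      · exact Or.inr ⟨q, hq, hql⟩

theorem build_spec (patterns : List String) :
    WF (patterns.foldl insertPat ⟨1, [[]], [false]⟩) ∧
    ∀ l, acceptsB (patterns.foldl insertPat ⟨1, [[]], [false]⟩) 0 l = true ↔ ∃ p ∈ patterns, p.toList = l := by
  obtain ⟨hW, hL⟩ := build_inv patterns ⟨1, [[]], [false]⟩ WF_init
  refine ⟨hW, ?_⟩
  intro l
  rw [hL l, accepts_init l]
  simp

theorem pm_eq_any (patterns : List String) (cs : List Char) :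
    pm (patterns.foldl insertPat ⟨1, [[]], [false]⟩) 0 cs
      = patterns.any (fun p => p.toList.isPrefixOf cs) := by
  obtain ⟨hW, hL⟩ := build_spec patterns
  have hiff : pm (patterns.foldl insertPat ⟨1, [[]], [false]⟩) 0 cs = true ↔
      patterns.any (fun p => p.toList.isPrefixOf cs) = true := by
    rw [pm_iff, List.any_eq_true]
    constructor
    · rintro ⟨l, hp, ha⟩
      obtain ⟨p, hm, rfl⟩ := (hL l).mp ha
      exact ⟨p, hm, List.isPrefixOf_iff_prefix.mpr hp⟩
    · rintro ⟨p, hm, hpre⟩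
      exact ⟨p.toList, List.isPrefixOf_iff_prefix.mp hpre, (hL p.toList).mpr ⟨p, hm, rfl⟩⟩
  cases h1 : pm (patterns.foldl insertPat ⟨1, [[]], [false]⟩) 0 cs <;>
    cases h2 : patterns.any (fun p => p.toList.isPrefixOf cs) <;> simp_all

theorem foldl_if_append {α β : Type} (P : α → Bool) (f : α → β) :
    ∀ (l : List α) (acc : List β),
      l.foldl (fun acc i => if P i then acc ++ [f i] else acc) acc
        = acc ++ l.filterMap (fun i => if P i then some (f i) else none) := by
  intro l
  induction l with
  | nil => simp
  | cons x xs ih =>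
    intro acc
    simp only [List.foldl_cons, List.filterMap_cons]
    by_cases h : P x = true
    · rw [if_pos h, if_pos h, ih]; simp
    · rw [Bool.not_eq_true] at h
      rw [h]; simp only [Bool.false_eq_true, if_false]
      exact ih acc

-- ===== VERDICT (by name: the statement is the Claim_ definition above) =====
theorem solve_spec : Claim_equal_solve := by
  intro text patterns _
  unfold Spec_solve solve solve_alt
  rw [foldl_if_append]
  simp only [List.nil_append]
  congr 1
  funext i
  rw [pm_eq_any]
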